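-- pv_equiv track=rewrite | github.com/aorursy/KT_dataset_py | navyafm_named-entity-recognition.py | cooccurence
-- ===== SOURCE A (Python) =====
-- from  itertools import combinations
-- from collections import defaultdict
-- from itertools import combinations
--
-- def cooccurence(common_entities):
--
--     com =  defaultdict(int)
--
--     for w1,w2 in combinations(sorted(common_entities),2):
--
--         com[w1, w2] += 1
--
--     result =  defaultdict(dict)
--
--     for (w1,w2), count in com.items():
--
--         if w1!= w2:
--
--             result[w1][w2]= {'weight':count}
--
--     return result
-- ===== SOURCE B (Python) =====
-- from collections import Counter, defaultdict
-- from itertools import combinations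
--
--
-- def cooccurence(common_entities):
--     # Count each entity once, then combine distinct entities pairwise:
--     # the number of ordered-by-sort co-occurrences of two distinct values
--     # u < v in the sorted list is count(u) * count(v).
--     cnt = Counter(common_entities)
--     result = defaultdict(dict)
--     for w1, w2 in combinations(sorted(cnt), 2):
--         result[w1][w2] = {'weight': cnt[w1] * cnt[w2]}
--     return result
-- ===== Notes on version B (the rewrite author's own statement) =====
-- stated objective: alternative
-- what changed: A counts every 2-combination of the sorted input list in a pair-keyed dict and then regroups; B counts each entity once with a Counter and sets weight = cnt[w1]*cnt[w2] for each 2-combination of the distinct sorted values, never enumerating element pairs.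
import Mathlib
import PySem

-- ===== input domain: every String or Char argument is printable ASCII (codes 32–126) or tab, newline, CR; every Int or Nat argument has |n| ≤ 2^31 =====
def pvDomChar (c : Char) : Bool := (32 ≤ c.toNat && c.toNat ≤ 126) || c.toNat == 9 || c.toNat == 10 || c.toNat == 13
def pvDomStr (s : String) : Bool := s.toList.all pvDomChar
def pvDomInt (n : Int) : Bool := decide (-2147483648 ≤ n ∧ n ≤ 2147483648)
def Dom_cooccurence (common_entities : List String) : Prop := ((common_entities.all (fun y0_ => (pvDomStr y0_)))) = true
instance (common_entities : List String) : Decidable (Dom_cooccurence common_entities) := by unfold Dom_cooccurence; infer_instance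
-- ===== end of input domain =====

-- B replaces A's enumeration of all element pairs by a Counter over the input plus one product per pair of DISTINCT sorted values (weight = cnt[w1]*cnt[w2]); return value only is claimed equal.

-- ===== PORT A =====
-- destructuring 'for w1, w2 in …' of a 2-combination (every element has length 2)
def pvPair (c : List String) : String × String :=
  match c with
  | [w1, w2] => (w1, w2)
  | _ => ("", "")

def cooccurence (common_entities : List String) : List (String × List (String × List (String × Int))) :=
  let com : PySem.Dict (String × String) Int :=
    (PySem.List.combinations (PySem.List.sorted common_entities (fun x => x) false) 2).foldl
      (fun d c => d.modify (pvPair c) 0 (· + 1)) PySem.Dict.empty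
  let result : PySem.Dict String (PySem.Dict String (List (String × Int))) :=
    com.items.foldl
      (fun r p =>
        if p.1.1 ≠ p.1.2 then
          r.modify p.1.1 PySem.Dict.empty (fun inner => inner.insert p.1.2 [("weight", p.2)])
        else r)
      PySem.Dict.empty
  result.items.map (fun e => (e.1, e.2.items))

-- ===== PORT B =====
def cooccurence_alt (common_entities : List String) : List (String × List (String × List (String × Int))) :=
  let cnt : PySem.Dict String Int := PySem.Dict.counter common_entities
  let result : PySem.Dict String (PySem.Dict String (List (String × Int))) :=
    (PySem.List.combinations (PySem.List.sorted cnt.keys (fun x => x) false) 2).foldl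
      (fun r c =>
        r.modify (pvPair c).1 PySem.Dict.empty
          (fun inner => inner.insert (pvPair c).2
            [("weight", cnt.getD (pvPair c).1 0 * cnt.getD (pvPair c).2 0)]))
      PySem.Dict.empty
  result.items.map (fun e => (e.1, e.2.items))

-- ===== PRECONDITION & SPEC =====
def Spec_cooccurence (common_entities : List String) (out : List (String × List (String × List (String × Int)))) : Prop := out = cooccurence_alt common_entities
instance (common_entities : List String) (out : List (String × List (String × List (String × Int)))) : Decidable (Spec_cooccurence common_entities out) := by unfold Spec_cooccurence; infer_instance

-- ===== CLAIM (what is proved, stated in full; the proofs are below) =====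
def Claim_equal_cooccurence : Prop := ∀ (common_entities : List String), Dom_cooccurence common_entities → Spec_cooccurence common_entities (cooccurence common_entities)

-- ===== LEMMAS AND PROOFS =====

-- run-length view of a sorted list: R is a list of (value, multiplicity) runs
def pvRep (R : List (String × Nat)) : List String :=
  R.flatMap (fun p => List.replicate p.2 p.1)

def pvGood (R : List (String × Nat)) : Prop :=
  List.Pairwise (fun a b => a.1 < b.1) R ∧ ∀ p ∈ R, 0 < p.2

-- the common output, computed from the runs
def pvTarget : List (String × Nat) → List (String × List (String × List (String × Int)))
  | [] => []
  | [_] => []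
  | p :: q :: R' =>
      (p.1, (q :: R').map (fun r => (r.1, [("weight", ((p.2 : Int) * r.2))]))) :: pvTarget (q :: R')

-- the triples a nested-dict-building loop processes, chunked by outer key
def pvFlat (chunks : List (String × List (String × List (String × Int)))) :
    List (String × String × List (String × Int)) :=
  chunks.flatMap (fun c => c.2.map (fun q => (c.1, q.1, q.2)))

-- the canonical nested-dict-building step:  result[w1][w2] = v
def pvStep (r : PySem.Dict String (PySem.Dict String (List (String × Int))))
    (t : String × String × List (String × Int)) :
    PySem.Dict String (PySem.Dict String (List (String × Int))) :=
  r.modify t.1 PySem.Dict.empty (fun inner => inner.insert t.2.1 t.2.2)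

def pvPairs (s : List String) : List (String × String) :=
  (PySem.List.combinations s 2).map pvPair

-- ---- Set.ofList utilities ----
theorem pvSet_update_eq {α : Type} [BEq α] [LawfulBEq α] [DecidableEq α] (b : List α) :
    ∀ s : List α, PySem.Set.update s b = s ++ (PySem.Set.ofList b).filter (fun y => decide (y ∉ s)) := by
  induction b with
  | nil => intro s; simp [PySem.Set.update, PySem.Set.ofList, PySem.Set.empty]
  | cons x b ih =>
    intro s
    have h1 : PySem.Set.update s (x :: b) = PySem.Set.update (PySem.Set.add s x) b := by
      simp [PySem.Set.update]
    have h2 : PySem.Set.ofList (x :: b) = PySem.Set.update (PySem.Set.add PySem.Set.empty x) b := by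
      simp [PySem.Set.ofList, PySem.Set.update]
    rw [h1, ih, h2, ih]
    have hadd : PySem.Set.add PySem.Set.empty x = [x] := by
      simp [PySem.Set.add, PySem.Set.empty]
    rw [hadd]
    by_cases hx : x ∈ s
    · have : PySem.Set.add s x = s := by
        simp [PySem.Set.add, hx]
      rw [this]
      congr 1
      rw [List.filter_append, List.filter_filter]
      have h3 : List.filter (fun y => decide (y ∉ s)) [x] = [] := by simp [hx]
      rw [h3, List.nil_append]
      apply List.filter_congr
      intro y hy
      by_cases hys : y ∈ s
      · simp [hys]
      · have : y ≠ x := fun h => hys (h ▸ hx)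
        simp [hys, this]
    · have : PySem.Set.add s x = s ++ [x] := by
        simp [PySem.Set.add, hx]
      rw [this, List.append_assoc]
      congr 1
      rw [List.filter_append, List.filter_filter]
      have h3 : List.filter (fun y => decide (y ∉ s)) [x] = [x] := by simp [hx]
      rw [h3]
      congr 1
      apply List.filter_congr
      intro y hy
      by_cases hys : y ∈ s
      · simp [hys]
      · by_cases hyx : y = x <;> simp [hys, hyx]

theorem pvSet_ofList_append {α : Type} [BEq α] [LawfulBEq α] [DecidableEq α] (a b : List α) :
    PySem.Set.ofList (a ++ b) =
      PySem.Set.ofList a ++ (PySem.Set.ofList b).filter (fun y => decide (y ∉ a)) := by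
  have h1 : PySem.Set.ofList (a ++ b) = PySem.Set.update (PySem.Set.ofList a) b := by
    simp [PySem.Set.ofList, PySem.Set.update, List.foldl_append]
  rw [h1, pvSet_update_eq]
  congr 1
  apply List.filter_congr
  intro y hy
  simp [PySem.Set.mem_ofList]

theorem pvSet_ofList_cons {α : Type} [BEq α] [LawfulBEq α] [DecidableEq α] (x : α) (l : List α) :
    PySem.Set.ofList (x :: l) = x :: (PySem.Set.ofList l).filter (fun y => decide (y ≠ x)) := by
  have h1 : (x :: l) = [x] ++ l := rfl
  rw [h1, pvSet_ofList_append]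
  have h2 : PySem.Set.ofList [x] = [x] := by simp [PySem.Set.ofList, PySem.Set.add, PySem.Set.empty]
  rw [h2]
  simp

theorem pvSet_ofList_map_inj {α β : Type} [BEq α] [LawfulBEq α] [DecidableEq α] [BEq β] [LawfulBEq β] [DecidableEq β]
    (f : α → β) (hf : Function.Injective f) (l : List α) :
    PySem.Set.ofList (l.map f) = (PySem.Set.ofList l).map f := by
  induction l with
  | nil => simp [PySem.Set.ofList, PySem.Set.empty]
  | cons x l ih =>
    rw [List.map_cons, pvSet_ofList_cons, pvSet_ofList_cons, ih, List.map_cons]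
    congr 1
    rw [List.filter_map]
    congr 1
    apply List.filter_congr
    intro y hy
    simp only [Function.comp_apply]
    by_cases h : y = x
    · simp [h]
    · have h2 : ¬ f y = f x := fun he => h (hf he)
      simp [h, h2]

-- ---- pvPairs facts ----
theorem pvPairs_cons (x : String) (t : List String) :
    pvPairs (x :: t) = t.map (fun y => (x, y)) ++ pvPairs t := by
  show (PySem.List.combinations (x :: t) (1 + 1)).map pvPair = _
  rw [PySem.List.combinations_cons_succ, PySem.List.combinations_one]
  simp [pvPairs, pvPair, List.map_map, Function.comp_def]

theorem pvPairs_mem {s : List String} {a b : String} (h : (a, b) ∈ pvPairs s) :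
    a ∈ s ∧ b ∈ s := by
  induction s with
  | nil =>
    simp [pvPairs, show (2:Nat) = 1 + 1 from rfl, PySem.List.combinations_nil_succ] at h
  | cons x t ih =>
    rw [pvPairs_cons, List.mem_append] at h
    rcases h with h | h
    · obtain ⟨y, hy, he⟩ := List.mem_map.mp h
      obtain ⟨rfl, rfl⟩ := Prod.mk.injEq .. ▸ he
      exact ⟨by simp_all [Prod.ext_iff], by simp_all [Prod.ext_iff]⟩
    · obtain ⟨ha, hb⟩ := ih h
      exact ⟨List.mem_cons_of_mem _ ha, List.mem_cons_of_mem _ hb⟩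

theorem pvCount_map_pair (x a b : String) (t : List String) :
    (t.map (fun y => (x, y))).count (a, b) = if a = x then t.count b else 0 := by
  by_cases h : a = x
  · subst h
    rw [if_pos rfl]
    exact List.count_map_of_injective t (fun y => (a, y)) (fun u v huv => (Prod.mk.injEq .. ▸ huv).2) b
  · rw [if_neg h]
    apply List.count_eq_zero_of_not_mem
    intro hm
    obtain ⟨y, hy, he⟩ := List.mem_map.mp hm
    exact h ((Prod.mk.injEq .. ▸ he).1.symm)

theorem pvCount_cons_ne {x a b : String} (t : List String) (h : a ≠ x) :
    (pvPairs (x :: t)).count (a, b) = (pvPairs t).count (a, b) := by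
  rw [pvPairs_cons, List.count_append, pvCount_map_pair, if_neg h, Nat.zero_add]

theorem pvCount_rep_ne {u a b : String} (h : a ≠ u) (k : Nat) (t : List String) :
    (pvPairs (List.replicate k u ++ t)).count (a, b) = (pvPairs t).count (a, b) := by
  induction k with
  | zero => simp
  | succ k ih =>
    rw [List.replicate_succ, List.cons_append, pvCount_cons_ne _ h, ih]

theorem pvCount_rep {u b : String} (h : b ≠ u) (k : Nat) (t : List String) :
    (pvPairs (List.replicate k u ++ t)).count (u, b) = k * t.count b + (pvPairs t).count (u, b) := by
  induction k with
  | zero => simp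
  | succ k ih =>
    rw [List.replicate_succ, List.cons_append, pvPairs_cons, List.count_append,
      pvCount_map_pair, if_pos rfl, List.count_append, List.count_replicate, ih]
    have hub : (u == b) = false := by simp [Ne.symm h]
    simp only [hub, Bool.false_eq_true, if_false]
    ring

theorem pvRep_mem {R : List (String × Nat)} (hg : pvGood R) (v : String) :
    v ∈ pvRep R ↔ v ∈ R.map (·.1) := by
  simp only [pvRep, List.mem_flatMap, List.mem_replicate, List.mem_map]
  constructor
  · rintro ⟨p, hp, -, rfl⟩; exact ⟨p, hp, rfl⟩
  · rintro ⟨p, hp, rfl⟩; exact ⟨p, hp, by have := hg.2 p hp; omega, rfl⟩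

theorem pvCount_pvRep {R : List (String × Nat)} (hg : pvGood R) {q : String × Nat} (hq : q ∈ R) :
    (pvRep R).count q.1 = q.2 := by
  induction R with
  | nil => cases hq
  | cons p R' ih =>
    have hg' : pvGood R' := ⟨hg.1.tail, fun r hr => hg.2 r (List.mem_cons_of_mem _ hr)⟩
    have hrep : pvRep (p :: R') = List.replicate p.2 p.1 ++ pvRep R' := by
      simp [pvRep]
    rcases List.mem_cons.mp hq with rfl | hq'
    · have hz : q.1 ∉ pvRep R' := by
        rw [pvRep_mem hg']
        intro hm
        obtain ⟨r, hr, he⟩ := List.mem_map.mp hm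
        exact absurd (he ▸ (List.pairwise_cons.mp hg.1).1 r hr) (lt_irrefl _)
      rw [hrep, List.count_append, List.count_replicate,
        List.count_eq_zero_of_not_mem hz]
      simp
    · have hne : q.1 ≠ p.1 := by
        intro he
        exact absurd (he ▸ (List.pairwise_cons.mp hg.1).1 q hq') (lt_irrefl _)
      rw [hrep, List.count_append, List.count_replicate, ih hg' hq']
      have hm : (p.1 == q.1) = false := by simp [Ne.symm hne]
      simp [hm]

-- ---- runs facts ----
theorem pvSet_ofList_replicate (u : String) (k : Nat) (hk : 1 ≤ k) :
    PySem.Set.ofList (List.replicate k u) = [u] := by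
  obtain ⟨k, rfl⟩ := Nat.exists_eq_add_of_le hk
  rw [Nat.add_comm, List.replicate_succ, pvSet_ofList_cons]
  have : ∀ y ∈ PySem.Set.ofList (List.replicate k u), ¬ (decide (y ≠ u) = true) := by
    intro y hy
    have := (List.mem_replicate.mp ((PySem.Set.mem_ofList _ _).mp hy)).2
    simp [this]
  rw [List.filter_eq_nil_iff.mpr this]

theorem pvSet_ofList_pvRep {R : List (String × Nat)} (hg : pvGood R) :
    PySem.Set.ofList (pvRep R) = R.map (·.1) := by
  induction R with
  | nil => simp [pvRep, PySem.Set.ofList, PySem.Set.empty]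
  | cons p R' ih =>
    have hg' : pvGood R' := ⟨hg.1.tail, fun r hr => hg.2 r (List.mem_cons_of_mem _ hr)⟩
    have hrep : pvRep (p :: R') = List.replicate p.2 p.1 ++ pvRep R' := by simp [pvRep]
    rw [hrep, pvSet_ofList_append, pvSet_ofList_replicate _ _ (hg.2 p (List.mem_cons_self ..)),
      ih hg']
    have hkeep : ∀ y ∈ R'.map (·.1), decide (y ∉ List.replicate p.2 p.1) = true := by
      intro y hy
      obtain ⟨r, hr, rfl⟩ := List.mem_map.mp hy
      have hlt := (List.pairwise_cons.mp hg.1).1 r hr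
      simp only [decide_eq_true_eq, List.mem_replicate]
      exact fun hc => absurd (hc.2 ▸ hlt) (lt_irrefl _)
    rw [List.filter_eq_self.mpr hkeep]
    simp

theorem pvMem_map_pair (u a b : String) (L : List String) :
    (a, b) ∈ L.map (fun v => (u, v)) ↔ a = u ∧ b ∈ L := by
  simp only [List.mem_map, Prod.mk.injEq]
  constructor
  · rintro ⟨v, hv, rfl, rfl⟩; exact ⟨rfl, hv⟩
  · rintro ⟨rfl, hb⟩; exact ⟨b, hb, rfl, rfl⟩

theorem pvSet_pairs_rep (u : String) (k : Nat) (hk : 1 ≤ k) (t : List String) (hu : u ∉ t) :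
    PySem.Set.ofList (pvPairs (List.replicate k u ++ t)) =
      (if 2 ≤ k then [(u, u)] else []) ++ (PySem.Set.ofList t).map (fun v => (u, v)) ++
        PySem.Set.ofList (pvPairs t) := by
  induction k, hk using Nat.le_induction with
  | base =>
    rw [if_neg (by omega)]
    have h1 : List.replicate 1 u ++ t = u :: t := rfl
    rw [h1, pvPairs_cons, pvSet_ofList_append,
      pvSet_ofList_map_inj _ (fun y z h => (Prod.mk.injEq .. ▸ h).2)]
    have hkeep : ∀ y ∈ PySem.Set.ofList (pvPairs t),
        decide (y ∉ t.map (fun y => (u, y))) = true := by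
      intro y hy
      have hmem := (PySem.Set.mem_ofList _ _).mp hy
      have ha := (pvPairs_mem (show (y.1, y.2) ∈ pvPairs t from hmem)).1
      simp only [decide_eq_true_eq]
      intro hc
      exact hu (((pvMem_map_pair u y.1 y.2 t).mp hc).1 ▸ ha)
    rw [List.filter_eq_self.mpr hkeep]
    simp
  | succ k hk ih =>
    have h1 : List.replicate (k + 1) u ++ t = u :: (List.replicate k u ++ t) := by
      rw [List.replicate_succ, List.cons_append]
    rw [h1, pvPairs_cons, pvSet_ofList_append,
      pvSet_ofList_map_inj _ (fun y z h => (Prod.mk.injEq .. ▸ h).2), ih,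
      pvSet_ofList_append, pvSet_ofList_replicate _ _ hk]
    have hkeepT : ∀ y ∈ PySem.Set.ofList t, decide (y ∉ List.replicate k u) = true := by
      intro y hy
      have := (PySem.Set.mem_ofList _ _).mp hy
      simp only [decide_eq_true_eq, List.mem_replicate]
      exact fun hc => hu (hc.2 ▸ this)
    rw [List.filter_eq_self.mpr hkeepT]
    rw [List.filter_append, List.filter_append]
    have hM : ∀ a b : String, ((a, b) ∈ (List.replicate k u ++ t).map (fun y => (u, y))) ↔
        (a = u ∧ (b = u ∨ b ∈ t)) := by
      intro a b
      rw [pvMem_map_pair]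
      simp only [List.mem_append, List.mem_replicate]
      constructor
      · rintro ⟨rfl, hb | hb⟩
        · exact ⟨rfl, Or.inl hb.2⟩
        · exact ⟨rfl, Or.inr hb⟩
      · rintro ⟨rfl, rfl | hb⟩
        · exact ⟨rfl, Or.inl ⟨by omega, rfl⟩⟩
        · exact ⟨rfl, Or.inr hb⟩
    have hdrop1 : List.filter
        (fun y => decide (y ∉ (List.replicate k u ++ t).map (fun y => (u, y))))
        (if 2 ≤ k then [(u, u)] else []) = [] := by
      split
      · apply List.filter_eq_nil_iff.mpr
        intro y hy
        rw [List.mem_singleton] at hy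
        subst hy
        simp only [decide_eq_true_eq, not_not]
        exact (hM u u).mpr ⟨rfl, Or.inl rfl⟩
      · rfl
    have hdrop2 : List.filter
        (fun y => decide (y ∉ (List.replicate k u ++ t).map (fun y => (u, y))))
        ((PySem.Set.ofList t).map (fun v => (u, v))) = [] := by
      apply List.filter_eq_nil_iff.mpr
      intro y hy
      obtain ⟨v, hv, rfl⟩ := List.mem_map.mp hy
      simp only [decide_eq_true_eq, not_not]
      exact (hM u v).mpr ⟨rfl, Or.inr ((PySem.Set.mem_ofList _ _).mp hv)⟩
    have hkeep3 : ∀ y ∈ PySem.Set.ofList (pvPairs t),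
        decide (y ∉ (List.replicate k u ++ t).map (fun y => (u, y))) = true := by
      intro y hy
      have hmem := (PySem.Set.mem_ofList _ _).mp hy
      have ha := (pvPairs_mem (show (y.1, y.2) ∈ pvPairs t from hmem)).1
      simp only [decide_eq_true_eq]
      intro hc
      exact hu (((hM y.1 y.2).mp (by exact hc)).1 ▸ ha)
    rw [hdrop1, hdrop2, List.filter_eq_self.mpr hkeep3, if_pos (by omega)]
    simp

-- ---- the nested-dict fold ----
theorem pvStep_insert (u : String) (inner : PySem.Dict String (List (String × Int)))
    (d : PySem.Dict String (PySem.Dict String (List (String × Int))))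
    (vs : List (String × List (String × Int))) :
    (vs.map (fun q => (u, q.1, q.2))).foldl pvStep (d.insert u inner) =
      d.insert u (vs.foldl (fun i q => i.insert q.1 q.2) inner) := by
  induction vs generalizing inner with
  | nil => simp
  | cons v vs ih =>
    rw [List.map_cons, List.foldl_cons, List.foldl_cons]
    have hstep : pvStep (d.insert u inner) (u, v.1, v.2) =
        d.insert u (inner.insert v.1 v.2) := by
      unfold pvStep
      rw [PySem.Dict.modify, PySem.Dict.getD_insert_self, PySem.Dict.insert_insert_self]
    rw [hstep, ih]

theorem pvNestFold (chunks : List (String × List (String × List (String × Int))))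
    (hod : (chunks.map (·.1)).Nodup)
    (hin : ∀ c ∈ chunks, c.2 ≠ [] ∧ (c.2.map (·.1)).Nodup) :
    ∀ d : PySem.Dict String (PySem.Dict String (List (String × Int))),
      (∀ c ∈ chunks, c.1 ∉ d.keys) →
      ((pvFlat chunks).foldl pvStep d).items.map (fun e => (e.1, e.2.items)) =
        d.items.map (fun e => (e.1, e.2.items)) ++ chunks := by
  induction chunks with
  | nil => intro d _; simp [pvFlat]
  | cons c chunks ih =>
    intro d hd
    obtain ⟨u, vs⟩ := c
    obtain ⟨v, vs', rfl⟩ : ∃ v vs', vs = v :: vs' := by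
      rcases vs with _ | ⟨v, vs'⟩
      · exact absurd rfl (hin (u, []) (List.mem_cons_self ..)).1
      · exact ⟨v, vs', rfl⟩
    have hufresh : (d.contains u) = false := by
      rcases h : d.contains u with _ | _
      · rfl
      · exact absurd ((PySem.Dict.contains_iff_mem_keys d u).mp h)
          (hd (u, v :: vs') (List.mem_cons_self ..))
    have hflat : pvFlat ((u, v :: vs') :: chunks) =
        ((v :: vs').map (fun q => (u, q.1, q.2))) ++ pvFlat chunks := by
      simp [pvFlat]
    rw [hflat, List.foldl_append]
    -- process the head chunk
    have hfirst : pvStep d (u, v.1, v.2) = d.insert u (PySem.Dict.empty.insert v.1 v.2) := by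
      unfold pvStep
      rw [PySem.Dict.modify, PySem.Dict.getD_of_not_contains d _ hufresh]
    have hchunk : ((v :: vs').map (fun q => (u, q.1, q.2))).foldl pvStep d =
        d.insert u ((v :: vs').foldl (fun i q => i.insert q.1 q.2) PySem.Dict.empty) := by
      rw [List.map_cons, List.foldl_cons, hfirst, pvStep_insert, List.foldl_cons]
    rw [hchunk]
    -- the inner dict's items are exactly the chunk
    have hinner : ((v :: vs').foldl (fun i q => i.insert q.1 q.2) PySem.Dict.empty).items
        = v :: vs' := by
      have := PySem.Dict.items_foldl_insert_fresh (v :: vs') (fun q => q.1) (fun q => q.2)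
        PySem.Dict.empty (fun a _ => rfl) (hin (u, v :: vs') (List.mem_cons_self ..)).2
      simpa using this
    rw [List.foldl_cons] at hinner
    -- recurse
    have hkeys : ∀ c' ∈ chunks, c'.1 ∉ (d.insert u ((v :: vs').foldl (fun i q => i.insert q.1 q.2) PySem.Dict.empty)).keys := by
      intro c' hc'
      rw [PySem.Dict.keys_insert_of_not_contains d _ hufresh, List.mem_append]
      rintro (h | h)
      · exact hd c' (List.mem_cons_of_mem _ hc') h
      · rw [List.mem_singleton] at h
        have : c'.1 ∈ chunks.map (·.1) := List.mem_map_of_mem hc'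
        exact (List.nodup_cons.mp hod).1 (h ▸ this)
    rw [ih (List.nodup_cons.mp hod).2 (fun c' hc' => hin c' (List.mem_cons_of_mem _ hc'))
      _ hkeys]
    rw [PySem.Dict.items_insert_of_not_contains d _ hufresh]
    simp [hinner]

-- ---- pvTarget facts ----
theorem pvKeys_pairwise {R : List (String × Nat)} (hg : pvGood R) :
    List.Pairwise (· < ·) (R.map (·.1)) :=
  List.pairwise_map.mpr hg.1

theorem pvKeys_nodup {R : List (String × Nat)} (hg : pvGood R) :
    (R.map (·.1)).Nodup :=
  (pvKeys_pairwise hg).imp ne_of_lt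

theorem pvTarget_keys_sublist (R : List (String × Nat)) :
    ((pvTarget R).map (·.1)).Sublist (R.map (·.1)) := by
  induction R using pvTarget.induct with
  | case1 => simp [pvTarget]
  | case2 p => simp [pvTarget]
  | case3 p q R' ih =>
    rw [pvTarget, List.map_cons, List.map_cons]
    exact List.Sublist.cons₂ _ ih

theorem pvTarget_inner {R : List (String × Nat)} (hg : pvGood R) :
    ∀ c ∈ pvTarget R, c.2 ≠ [] ∧ (c.2.map (·.1)).Nodup := by
  induction R using pvTarget.induct with
  | case1 => simp [pvTarget]
  | case2 p => simp [pvTarget]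
  | case3 p q R' ih =>
    intro c hc
    have hg' : pvGood (q :: R') := ⟨hg.1.tail, fun r hr => hg.2 r (List.mem_cons_of_mem _ hr)⟩
    rw [pvTarget, List.mem_cons] at hc
    rcases hc with rfl | hc
    · constructor
      · simp
      · have : ((q :: R').map (fun r => (r.1, [("weight", ((p.2 : Int) * r.2))]))).map (·.1)
            = (q :: R').map (·.1) := by
          simp [List.map_map, Function.comp_def]
        rw [this]
        exact pvKeys_nodup hg'
    · exact ih hg' c hc

-- ---- characterizations ----
theorem pvA_triples {R : List (String × Nat)} (hg : pvGood R) :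
    ((PySem.Set.ofList (pvPairs (pvRep R))).filter (fun p => decide (p.1 ≠ p.2))).map
        (fun p => (p.1, p.2, [("weight", ((pvPairs (pvRep R)).count p : Int))])) =
      pvFlat (pvTarget R) := by
  induction R using pvTarget.induct with
  | case1 =>
    simp [pvRep, pvPairs, pvTarget, pvFlat, show (2:Nat) = 1 + 1 from rfl,
      PySem.List.combinations_nil_succ, PySem.Set.ofList, PySem.Set.empty]
  | case2 p =>
    have hrep : pvRep [p] = List.replicate p.2 p.1 ++ [] := by simp [pvRep]
    rw [hrep, pvSet_pairs_rep p.1 p.2 (hg.2 p (List.mem_cons_self ..)) []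
      (List.not_mem_nil)]
    have h0 : pvPairs [] = [] := by
      simp [pvPairs, show (2:Nat) = 1 + 1 from rfl, PySem.List.combinations_nil_succ]
    rw [h0]
    simp only [PySem.Set.ofList, PySem.Set.empty, List.foldl_nil, List.map_nil,
      List.append_nil]
    split
    · simp [pvTarget, pvFlat]
    · simp [pvTarget, pvFlat]
  | case3 p q R' =>
    rename_i ih
    have hg' : pvGood (q :: R') := ⟨hg.1.tail, fun r hr => hg.2 r (List.mem_cons_of_mem _ hr)⟩
    have hlt : ∀ r ∈ q :: R', p.1 < r.1 := (List.pairwise_cons.mp hg.1).1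
    have hrep : pvRep (p :: q :: R') = List.replicate p.2 p.1 ++ pvRep (q :: R') := by
      simp [pvRep]
    have hu : p.1 ∉ pvRep (q :: R') := by
      rw [pvRep_mem hg']
      intro hm
      obtain ⟨r, hr, he⟩ := List.mem_map.mp hm
      exact absurd (he ▸ hlt r hr) (lt_irrefl _)
    rw [hrep, pvSet_pairs_rep p.1 p.2 (hg.2 p (List.mem_cons_self ..)) _ hu,
      pvSet_ofList_pvRep hg']
    rw [List.filter_append, List.filter_append]
    -- the (u,u) entry is filtered out
    have hd1 : List.filter (fun x => decide (x.1 ≠ x.2)) (if 2 ≤ p.2 then [(p.1, p.1)] else [])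
        = [] := by
      split <;> simp
    -- the (u,v) entries all stay
    have hk2 : List.filter (fun x => decide (x.1 ≠ x.2))
        (((q :: R').map (·.1)).map (fun v => (p.1, v)))
        = ((q :: R').map (·.1)).map (fun v => (p.1, v)) := by
      apply List.filter_eq_self.mpr
      intro y hy
      obtain ⟨v, hv, rfl⟩ := List.mem_map.mp hy
      obtain ⟨r, hr, rfl⟩ := List.mem_map.mp hv
      simp only [decide_eq_true_eq]
      exact fun he => absurd (he ▸ hlt r hr) (lt_irrefl _)
    rw [hd1, hk2, List.nil_append, List.map_append]
    -- counts on the fresh (u, v) pairs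
    have hmap1 : (((q :: R').map (·.1)).map (fun v => (p.1, v))).map
          (fun x => (x.1, x.2,
            [("weight", ((pvPairs (List.replicate p.2 p.1 ++ pvRep (q :: R'))).count x : Int))]))
        = ((q :: R').map (fun r => (r.1, [("weight", ((p.2 : Int) * r.2))]))).map
          (fun q' => (p.1, q'.1, q'.2)) := by
      rw [List.map_map, List.map_map, List.map_map]
      apply List.map_congr_left
      intro r hr
      simp only [Function.comp_apply]
      have hne : r.1 ≠ p.1 := fun he => absurd (he ▸ hlt r hr) (lt_irrefl _)
      have hz : (pvPairs (pvRep (q :: R'))).count (p.1, r.1) = 0 := by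
        apply List.count_eq_zero_of_not_mem
        intro hm
        exact hu (pvPairs_mem hm).1
      rw [pvCount_rep hne p.2 (pvRep (q :: R')), hz,
        pvCount_pvRep hg' hr, Nat.add_zero]
      push_cast
      rfl
    -- counts on the remaining pairs agree with the tail counts
    have hmap2 : (List.filter (fun x => decide (x.1 ≠ x.2))
          (PySem.Set.ofList (pvPairs (pvRep (q :: R'))))).map
          (fun x => (x.1, x.2,
            [("weight", ((pvPairs (List.replicate p.2 p.1 ++ pvRep (q :: R'))).count x : Int))]))
        = pvFlat (pvTarget (q :: R')) := by
      rw [← ih hg']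
      apply List.map_congr_left
      intro y hy
      obtain ⟨a, b⟩ := y
      have hmem : (a, b) ∈ pvPairs (pvRep (q :: R')) :=
        (PySem.Set.mem_ofList _ _).mp (List.mem_of_mem_filter hy)
      have ha : a ∈ pvRep (q :: R') := (pvPairs_mem hmem).1
      have hne : a ≠ p.1 := fun he => hu (he ▸ ha)
      rw [pvCount_rep_ne hne p.2 (pvRep (q :: R'))]
    rw [hmap1, hmap2]
    simp only [pvTarget, pvFlat, List.flatMap_cons]

theorem pvB_triples {R : List (String × Nat)} (hg : pvGood R) (f : String → Int)
    (hf : ∀ q ∈ R, f q.1 = (q.2 : Int)) :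
    (pvPairs (R.map (·.1))).map (fun p => (p.1, p.2, [("weight", f p.1 * f p.2)])) =
      pvFlat (pvTarget R) := by
  induction R using pvTarget.induct with
  | case1 => simp [pvPairs, pvTarget, pvFlat, show (2:Nat) = 1 + 1 from rfl,
      PySem.List.combinations_nil_succ]
  | case2 p => simp [pvPairs, pvTarget, pvFlat, show (2:Nat) = 1 + 1 from rfl,
      PySem.List.combinations_cons_succ, PySem.List.combinations_nil_succ,
      PySem.List.combinations_one]
  | case3 p q R' ih =>
    have hg' : pvGood (q :: R') := ⟨hg.1.tail, fun r hr => hg.2 r (List.mem_cons_of_mem _ hr)⟩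
    rw [List.map_cons, pvPairs_cons, List.map_append,
      ih hg' (fun r hr => hf r (List.mem_cons_of_mem _ hr)), pvTarget]
    have hhead : ((((q :: R').map (·.1)).map (fun y => (p.1, y))).map
          (fun x => (x.1, x.2, [("weight", f x.1 * f x.2)])))
        = ((q :: R').map (fun r => (r.1, [("weight", ((p.2 : Int) * r.2))]))).map
          (fun q' => (p.1, q'.1, q'.2)) := by
      rw [List.map_map, List.map_map, List.map_map]
      apply List.map_congr_left
      intro r hr
      simp only [Function.comp_apply]
      rw [hf p (List.mem_cons_self ..), hf r (List.mem_cons_of_mem _ hr)]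
    simp only [pvFlat, List.flatMap_cons]
    rw [← hhead]

theorem pvNest_apply {R : List (String × Nat)} (hg : pvGood R) :
    ((pvFlat (pvTarget R)).foldl pvStep PySem.Dict.empty).items.map
        (fun e => (e.1, e.2.items)) = pvTarget R := by
  have h := pvNestFold (pvTarget R)
    ((pvTarget_keys_sublist R).nodup (pvKeys_nodup hg))
    (pvTarget_inner hg) PySem.Dict.empty (by intro c _; simp [PySem.Dict.keys, PySem.Dict.empty])
  simpa [PySem.Dict.empty] using h

theorem pvA_char (ce : List String) {R : List (String × Nat)} (hg : pvGood R)
    (hs : PySem.List.sorted ce (fun x => x) false = pvRep R) :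
    cooccurence ce = pvTarget R := by
  show (((PySem.List.combinations (PySem.List.sorted ce (fun x => x) false) 2).foldl
      (fun d c => d.modify (pvPair c) 0 (· + 1)) PySem.Dict.empty).items.foldl
      (fun r p =>
        if p.1.1 ≠ p.1.2 then
          r.modify p.1.1 PySem.Dict.empty (fun inner => inner.insert p.1.2 [("weight", p.2)])
        else r)
      PySem.Dict.empty).items.map (fun e => (e.1, e.2.items)) = pvTarget R
  rw [hs]
  have hcom : (PySem.List.combinations (pvRep R) 2).foldl
      (fun d c => d.modify (pvPair c) 0 (· + 1)) PySem.Dict.empty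
      = PySem.Dict.counter (pvPairs (pvRep R)) := by
    rw [PySem.Dict.counter_eq_foldl, pvPairs, List.foldl_map]
  rw [hcom, PySem.Dict.items_counter]
  rw [PySem.List.foldl_ite_eq_foldl_filter
    (fun (p : (String × String) × Int) => p.1.1 ≠ p.1.2)
    (fun r p => r.modify p.1.1 PySem.Dict.empty (fun inner => inner.insert p.1.2 [("weight", p.2)]))
    ((PySem.Set.ofList (pvPairs (pvRep R))).map
      (fun k => (k, ((pvPairs (pvRep R)).count k : Int))))
    PySem.Dict.empty]
  rw [List.filter_map]
  rw [List.foldl_map]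
  have hfold : ∀ (L : List (String × String))
      (d : PySem.Dict String (PySem.Dict String (List (String × Int)))),
      L.foldl (fun r x => r.modify x.1 PySem.Dict.empty
          (fun inner => inner.insert x.2 [("weight", ((pvPairs (pvRep R)).count x : Int))])) d
        = (L.map (fun x => (x.1, x.2, [("weight", ((pvPairs (pvRep R)).count x : Int))]))).foldl
            pvStep d := by
    intro L d
    rw [List.foldl_map]
    rfl
  rw [hfold]
  have htri := pvA_triples hg
  have hpred : (List.filter ((fun p => decide (p.1.1 ≠ p.1.2)) ∘ fun k =>
        (k, ((pvPairs (pvRep R)).count k : Int))) (PySem.Set.ofList (pvPairs (pvRep R))))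
      = List.filter (fun p => decide (p.1 ≠ p.2)) (PySem.Set.ofList (pvPairs (pvRep R))) := rfl
  rw [hpred, htri, pvNest_apply hg]

theorem pvB_char (ce : List String) {R : List (String × Nat)} (hg : pvGood R)
    (hs : PySem.List.sorted ce (fun x => x) false = pvRep R) :
    cooccurence_alt ce = pvTarget R := by
  show (((PySem.List.combinations
        (PySem.List.sorted (PySem.Dict.counter ce).keys (fun x => x) false) 2).foldl
      (fun r c =>
        r.modify (pvPair c).1 PySem.Dict.empty
          (fun inner => inner.insert (pvPair c).2
            [("weight", (PySem.Dict.counter ce).getD (pvPair c).1 0 *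
              (PySem.Dict.counter ce).getD (pvPair c).2 0)]))
      PySem.Dict.empty).items).map (fun e => (e.1, e.2.items)) = pvTarget R
  rw [PySem.Dict.keys_counter]
  have hmem : ∀ a : String, a ∈ ce ↔ a ∈ pvRep R := by
    intro a
    rw [← hs]
    exact ⟨fun h => ((PySem.List.sorted_perm ce (fun x => x) false).mem_iff).mpr h,
      fun h => ((PySem.List.sorted_perm ce (fun x => x) false).mem_iff).mp h⟩
  have hks : PySem.List.sorted (PySem.Set.ofList ce) (fun x => x) false = R.map (·.1) := by
    apply PySem.List.sorted_eq_of_perm_of_pairwise_lt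
    · rw [List.perm_ext_iff_of_nodup (pvKeys_nodup hg) (PySem.Set.nodup_ofList ce)]
      intro a
      rw [PySem.Set.mem_ofList, ← pvRep_mem hg, ← hmem]
    · exact pvKeys_pairwise hg
  rw [hks]
  have hcnt : ∀ q ∈ R, (PySem.Dict.counter ce).getD q.1 0 = (q.2 : Int) := by
    intro q hq
    rw [PySem.Dict.getD_counter]
    have h1 : ce.count q.1 = (pvRep R).count q.1 := by
      rw [← hs]
      exact (PySem.List.sorted_perm ce (fun x => x) false).count_eq q.1 |>.symm ▸
        ((PySem.List.sorted_perm ce (fun x => x) false).symm.count_eq q.1)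
    rw [h1, pvCount_pvRep hg hq]
  have hfold : ∀ (L : List (List String))
      (d : PySem.Dict String (PySem.Dict String (List (String × Int)))),
      L.foldl (fun r c => r.modify (pvPair c).1 PySem.Dict.empty
          (fun inner => inner.insert (pvPair c).2
            [("weight", (PySem.Dict.counter ce).getD (pvPair c).1 0 *
              (PySem.Dict.counter ce).getD (pvPair c).2 0)])) d
        = ((L.map pvPair).map (fun x => (x.1, x.2,
            [("weight", (PySem.Dict.counter ce).getD x.1 0 *
              (PySem.Dict.counter ce).getD x.2 0)]))).foldl pvStep d := by
    intro L d
    rw [List.foldl_map, List.foldl_map]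
    rfl
  rw [hfold]
  have htri := pvB_triples hg (fun v => (PySem.Dict.counter ce).getD v 0) hcnt
  rw [show ((PySem.List.combinations (R.map (·.1)) 2).map pvPair) = pvPairs (R.map (·.1))
    from rfl, htri, pvNest_apply hg]

theorem pvExists_aux (n : Nat) :
    ∀ l : List String, l.length ≤ n → List.Pairwise (· ≤ ·) l →
      ∃ R, pvGood R ∧ l = pvRep R := by
  induction n with
  | zero =>
    intro l hl _
    have : l = [] := List.length_eq_zero_iff.mp (Nat.le_zero.mp hl)
    exact ⟨[], ⟨List.Pairwise.nil, by simp⟩, by simp [this, pvRep]⟩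
  | succ n ih =>
    intro l hl hp
    cases l with
    | nil => exact ⟨[], ⟨List.Pairwise.nil, by simp⟩, by simp [pvRep]⟩
    | cons x t =>
      have hxle : ∀ y ∈ t, x ≤ y := (List.pairwise_cons.mp hp).1
      have hpt : List.Pairwise (· ≤ ·) t := (List.pairwise_cons.mp hp).2
      have ht2p : List.Pairwise (· ≤ ·) (t.dropWhile (fun z => z == x)) :=
        hpt.sublist (List.dropWhile_sublist _)
      have hlen : (t.dropWhile (fun z => z == x)).length ≤ n := by
        have h1 := List.length_dropWhile_le (fun z => z == x) t
        have h2 : t.length ≤ n := by simpa using hl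
        omega
      obtain ⟨R2, hg2, he2⟩ := ih _ hlen ht2p
      have ht1 : t.takeWhile (fun z => z == x)
          = List.replicate (t.takeWhile (fun z => z == x)).length x := by
        apply List.eq_replicate_of_mem
        intro b hb
        have hpb := List.mem_takeWhile_imp hb
        exact eq_of_beq hpb
      have hlt : ∀ r ∈ R2, x < r.1 := by
        intro r hr
        have hr1 : r.1 ∈ t.dropWhile (fun z => z == x) := by
          rw [he2, pvRep_mem hg2]
          exact List.mem_map_of_mem hr
        have hrt : r.1 ∈ t := (List.dropWhile_sublist _).mem hr1
        rcases lt_or_eq_of_le (hxle r.1 hrt) with h | h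
        · exact h
        · exfalso
          have hne : t.dropWhile (fun z => z == x) ≠ [] := by
            intro hnil
            rw [hnil] at hr1
            exact absurd hr1 (List.not_mem_nil)
          set y0 := (t.dropWhile (fun z => z == x)).head hne with hy0
          have hhead := List.head_dropWhile_not (fun z => z == x) hne
          have hh : y0 ≠ x := by
            intro he
            rw [← hy0, he] at hhead
            simp at hhead
          have hhmem : y0 ∈ t := (List.dropWhile_sublist _).mem (List.head_mem hne)
          have hxh : x ≤ y0 := hxle _ hhmem
          have hcons := List.cons_head_tail hne
          have hhy : y0 ≤ r.1 := by
            rcases List.mem_cons.mp (hcons ▸ hr1) with h' | h'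
            · exact le_of_eq h'.symm
            · have hp2 := List.pairwise_cons.mp (hcons ▸ ht2p)
              exact hp2.1 r.1 h'
          rw [← h] at hhy
          exact hh (le_antisymm hhy hxh)
      refine ⟨(x, (t.takeWhile (fun z => z == x)).length + 1) :: R2, ⟨?_, ?_⟩, ?_⟩
      · exact List.pairwise_cons.mpr ⟨fun r hr => hlt r hr, hg2.1⟩
      · intro p hp'
        rcases List.mem_cons.mp hp' with rfl | h
        · simp
        · exact hg2.2 p h
      · have : pvRep ((x, (t.takeWhile (fun z => z == x)).length + 1) :: R2)
            = List.replicate ((t.takeWhile (fun z => z == x)).length + 1) x ++ pvRep R2 := by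
          simp [pvRep]
        rw [this, List.replicate_succ, List.cons_append, ← he2, ← ht1,
          List.takeWhile_append_dropWhile]

theorem pvExists (l : List String) (h : List.Pairwise (· ≤ ·) l) :
    ∃ R, pvGood R ∧ l = pvRep R :=
  pvExists_aux l.length l (le_refl _) h

-- ===== VERDICT (by name: the statement is the Claim_ definition above) =====
theorem cooccurence_spec : Claim_equal_cooccurence := by
  intro ce _
  obtain ⟨R, hg, hs⟩ := pvExists (PySem.List.sorted ce (fun x => x) false)
    (PySem.List.sorted_pairwise ce (fun x => x))
  unfold Spec_cooccurence
  rw [pvA_char ce hg hs, pvB_char ce hg hs]
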